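-- pv_equiv track=rewrite | github.com/stefantaubert/textgrid-ipa | src/textgrid_utils/intervals/symbols_joining.py | merge_together
-- ===== SOURCE A (Python) =====
-- from typing import Generator, List, Set, Tuple, cast
--
-- def merge_together(symbols: Tuple[str, ...], join: Set[str]) -> List[Tuple[str, ...]]:
--   current_chunk = []
--   for symbol in symbols:
--     if symbol in join:
--       current_chunk.append(symbol)
--     else:
--       if len(current_chunk) > 0:
--         yield current_chunk
--         current_chunk = []
--       yield [symbol]
--
--   if len(current_chunk) > 0:
--     yield current_chunk
-- ===== SOURCE B (Python) =====
-- def merge_together(symbols, join):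
--   # Build the chunk list back-to-front: scan right-to-left; a join symbol is
--   # prepended into the head chunk when that chunk is a join run, otherwise a
--   # new chunk is started.  A chunk's kind is read off its first element.
--   chunks = []
--   for symbol in reversed(symbols):
--     if symbol in join and chunks and chunks[0][0] in join:
--       chunks[0].insert(0, symbol)
--     else:
--       chunks.insert(0, [symbol])
--   yield from chunks
-- ===== Notes on version B (the rewrite author's own statement) =====
-- stated objective: alternative
-- what changed: Replaces A's forward state machine (current_chunk accumulator with flush-on-non-join and end-of-loop flush) by a right-to-left pass that builds the chunk list back-to-front, merging a join symbol into the head chunk when that chunk is a join run.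
import Mathlib
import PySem

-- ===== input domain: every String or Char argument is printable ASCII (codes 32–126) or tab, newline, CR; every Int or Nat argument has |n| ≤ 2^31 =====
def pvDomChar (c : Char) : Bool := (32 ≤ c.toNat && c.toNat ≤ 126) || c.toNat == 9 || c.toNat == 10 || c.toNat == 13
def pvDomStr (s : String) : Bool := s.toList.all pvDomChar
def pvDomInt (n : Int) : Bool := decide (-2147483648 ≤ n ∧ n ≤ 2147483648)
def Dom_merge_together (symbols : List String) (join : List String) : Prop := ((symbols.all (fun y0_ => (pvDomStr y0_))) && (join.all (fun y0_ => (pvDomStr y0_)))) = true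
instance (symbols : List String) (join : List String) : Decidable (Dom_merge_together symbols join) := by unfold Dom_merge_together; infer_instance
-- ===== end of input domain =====

-- B builds the chunk list back-to-front (right-to-left pass, merging into the head chunk) instead of A's forward accumulator/flush state machine; same cost, return values are equal on all inputs.


-- ===== PORT A =====
-- loop body of A: state = (emitted chunks, current_chunk)
def mtStep (join : List String) (st : List (List String) × List String) (symbol : String) :
    List (List String) × List String :=
  if symbol ∈ join then (st.1, st.2 ++ [symbol])
  else if st.2.length > 0 then (st.1 ++ [st.2] ++ [[symbol]], [])
  else (st.1 ++ [[symbol]], [])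

-- final flush of current_chunk
def mtFinish (st : List (List String) × List String) : List (List String) :=
  if st.2.length > 0 then st.1 ++ [st.2] else st.1

def merge_together (symbols : List String) (join : List String) : List (List String) :=
  mtFinish (symbols.foldl (mtStep join) ([], []))

-- ===== PORT B =====
-- body of B's reversed loop: prepend symbol into the head chunk when both are join, else start a new chunk
def btStep (join : List String) (symbol : String) (chunks : List (List String)) :
    List (List String) :=
  match chunks with
  | (c :: cs) :: rest =>
    if symbol ∈ join ∧ c ∈ join then (symbol :: c :: cs) :: rest
    else [symbol] :: (c :: cs) :: rest
  | _ => [symbol] :: chunks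

-- B: right-to-left pass over symbols (Python iterates reversed(symbols); foldr is that pass)
def merge_together_alt (symbols : List String) (join : List String) : List (List String) :=
  symbols.foldr (btStep join) []

-- ===== PRECONDITION & SPEC =====
def Spec_merge_together (symbols : List String) (join : List String) (out : List (List String)) : Prop := out = merge_together_alt symbols join
instance (symbols : List String) (join : List String) (out : List (List String)) : Decidable (Spec_merge_together symbols join out) := by unfold Spec_merge_together; infer_instance

-- ===== CLAIM (what is proved, stated in full; the proofs are below) =====
def Claim_equal_merge_together : Prop := ∀ (symbols : List String) (join : List String), Dom_merge_together symbols join → Spec_merge_together symbols join (merge_together symbols join)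

-- ===== LEMMAS AND PROOFS =====
-- proof-only intermediate characterisation: run-grouping via takeWhile/dropWhile
def gAlt (symbols : List String) (join : List String) : List (List String) :=
  match symbols with
  | [] => []
  | s :: rest =>
    if s ∈ join then
      (s :: rest.takeWhile (fun t => decide (t ∈ join)))
        :: gAlt (rest.dropWhile (fun t => decide (t ∈ join))) join
    else
      [s] :: gAlt rest join
termination_by symbols.length
decreasing_by
  · exact Nat.lt_succ_of_le (List.length_dropWhile_le _ _)
  · simp

lemma loop_eq (symbols : List String) (join : List String) (acc : List (List String))
    (cur : List String) :
    mtFinish (symbols.foldl (mtStep join) (acc, cur)) =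
      acc ++ mtFinish (symbols.foldl (mtStep join) ([], cur)) := by
  induction symbols generalizing acc cur with
  | nil => simp only [List.foldl_nil, mtFinish]; split <;> simp
  | cons s rest ih =>
    simp only [List.foldl_cons]
    by_cases hj : s ∈ join
    · simp only [mtStep, hj, if_pos]
      exact ih _ _
    · by_cases hc : cur.length > 0
      · simp only [mtStep, hj, if_pos hc, ite_false]
        rw [ih, ih ([] ++ [cur] ++ [[s]])]
        simp
      · simp only [mtStep, hj, if_neg hc, ite_false]
        rw [ih, ih ([] ++ [[s]])]
        simp

lemma run_lemma (join : List String) (symbols : List String) (cur : List String) :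
    mtFinish (symbols.foldl (mtStep join) ([], cur)) =
      if cur = [] then gAlt symbols join
      else (cur ++ symbols.takeWhile (fun t => decide (t ∈ join)))
        :: gAlt (symbols.dropWhile (fun t => decide (t ∈ join))) join := by
  induction symbols generalizing cur with
  | nil =>
    simp only [List.foldl_nil, mtFinish, gAlt, List.takeWhile_nil,
      List.dropWhile_nil, List.append_nil]
    rcases cur with _ | ⟨c, cs⟩ <;> simp
  | cons s rest ih =>
    simp only [List.foldl_cons]
    by_cases hj : s ∈ join
    · simp only [mtStep, hj, if_pos]
      rw [ih (cur ++ [s])]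
      rw [show gAlt (s :: rest) join
            = (s :: rest.takeWhile (fun t => decide (t ∈ join)))
              :: gAlt (rest.dropWhile (fun t => decide (t ∈ join))) join by
          rw [gAlt]; simp [hj]]
      simp [hj]
    · have halt : gAlt (s :: rest) join = [s] :: gAlt rest join := by
        rw [gAlt]
        simp [hj]
      by_cases hc : cur = []
      · subst hc
        simp only [mtStep, hj, ite_false, List.length_nil, gt_iff_lt,
          Nat.lt_irrefl, List.nil_append]
        rw [loop_eq, ih []]
        simp [halt]
      · have hcl : cur.length > 0 := List.length_pos_iff.mpr hc
        simp only [mtStep, hj, if_pos hcl, ite_false, List.nil_append]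
        rw [loop_eq, ih []]
        simp [hj, hc, halt]

lemma a_eq_gAlt (symbols : List String) (join : List String) :
    merge_together symbols join = gAlt symbols join := by
  unfold merge_together
  simpa using run_lemma join symbols []

-- one step of the backward pass on a run-grouped tail equals extending/starting a run
lemma btStep_gAlt (join : List String) (s : String) (rest : List String) (hs : s ∈ join) :
    btStep join s (gAlt rest join) =
      (s :: rest.takeWhile (fun t => decide (t ∈ join)))
        :: gAlt (rest.dropWhile (fun t => decide (t ∈ join))) join := by
  match rest with
  | [] => simp [gAlt, btStep]
  | t :: ts =>
    by_cases ht : t ∈ join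
    · rw [show gAlt (t :: ts) join
            = (t :: ts.takeWhile (fun x => decide (x ∈ join)))
              :: gAlt (ts.dropWhile (fun x => decide (x ∈ join))) join by
          rw [gAlt]; simp [ht]]
      simp [btStep, hs, ht, List.takeWhile, List.dropWhile]
    · rw [show gAlt (t :: ts) join = [t] :: gAlt ts join by rw [gAlt]; simp [ht]]
      simp [btStep, ht, List.takeWhile, List.dropWhile]
      rw [gAlt]; simp [ht]

lemma b_eq_gAlt (symbols : List String) (join : List String) :
    merge_together_alt symbols join = gAlt symbols join := by
  induction symbols with
  | nil => simp [merge_together_alt, gAlt]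
  | cons s rest ih =>
    have : merge_together_alt (s :: rest) join = btStep join s (merge_together_alt rest join) := rfl
    rw [this, ih]
    by_cases hs : s ∈ join
    · rw [btStep_gAlt join s rest hs, gAlt]; simp [hs]
    · rw [gAlt]
      simp [hs]
      match h : gAlt rest join with
      | [] => simp [btStep]
      | [] :: r => simp [btStep]
      | (c :: cs) :: r => simp [btStep, hs]

-- ===== VERDICT (by name: the statement is the Claim_ definition above) =====
theorem merge_together_spec : Claim_equal_merge_together := by
  intro symbols join _
  unfold Spec_merge_together
  rw [a_eq_gAlt, b_eq_gAlt]
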